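-- pv_equiv track=rewrite | github.com/nachetons/Bot_telegram_ia | app/tools/sports_prediction.py | calculate_h2h_advantage
-- ===== SOURCE A (Python) =====
-- def calculate_h2h_advantage(h2h: list, team_name: str) -> int:
--     wins = sum(1 for match in h2h if match.get("winner") == team_name)
--     losses = sum(
--         1
--         for match in h2h
--         if match.get("winner") not in {team_name, "draw", None}
--     )
--     return wins - losses
-- ===== SOURCE B (Python) =====
-- def calculate_h2h_advantage(h2h: list, team_name: str) -> int:
--     score = 0
--     for match in h2h:
--         w = match.get("winner")
--         if w == team_name:
--             score += 1
--         elif w is not None and w != "draw":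
--             score -= 1
--     return score
-- ===== Notes on version B (the rewrite author's own statement) =====
-- stated objective: simpler
-- what changed: Replace A's two staged generator-sum passes over the match list by a single pass with one signed accumulator that adds 1 for a win and subtracts 1 for a loss per match.
import Mathlib
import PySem

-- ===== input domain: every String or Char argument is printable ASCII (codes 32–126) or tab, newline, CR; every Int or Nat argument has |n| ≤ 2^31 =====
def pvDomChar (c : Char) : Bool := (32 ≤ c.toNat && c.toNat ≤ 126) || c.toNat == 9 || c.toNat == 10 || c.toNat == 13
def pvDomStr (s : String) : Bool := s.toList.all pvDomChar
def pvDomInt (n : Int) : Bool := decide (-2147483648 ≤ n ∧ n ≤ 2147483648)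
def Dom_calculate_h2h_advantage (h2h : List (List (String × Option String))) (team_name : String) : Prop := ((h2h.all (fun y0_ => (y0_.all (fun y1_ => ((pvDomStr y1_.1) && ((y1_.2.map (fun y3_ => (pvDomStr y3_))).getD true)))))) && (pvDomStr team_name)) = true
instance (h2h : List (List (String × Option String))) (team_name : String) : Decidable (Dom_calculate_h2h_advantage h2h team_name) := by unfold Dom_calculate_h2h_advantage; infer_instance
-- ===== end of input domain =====

-- B replaces A's two staged generator-sum passes with ONE pass over the matches
-- holding a single signed accumulator (+1 win, -1 loss); equal return values.

-- match.get("winner"): missing key and an explicit None value both give None.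
def pvWinner (m : List (String × Option String)) : Option String :=
  (PySem.Dict.get? (PySem.Dict.mk m) "winner").join

-- ===== PORT A =====
def calculate_h2h_advantage (h2h : List (List (String × Option String))) (team_name : String) : Int :=
  let wins : Int := h2h.foldl
    (fun acc m => if pvWinner m == some team_name then acc + 1 else acc) 0
  let losses : Int := h2h.foldl
    (fun acc m =>
      if !(pvWinner m == some team_name || pvWinner m == some "draw" || pvWinner m == none)
      then acc + 1 else acc) 0
  wins - losses

-- ===== PORT B =====
def calculate_h2h_advantage_alt (h2h : List (List (String × Option String))) (team_name : String) : Int :=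
  h2h.foldl
    (fun score m =>
      let w := pvWinner m
      if w == some team_name then score + 1
      else if !(w == none) && !(w == some "draw") then score - 1
      else score) 0

-- ===== PRECONDITION & SPEC =====
def Spec_calculate_h2h_advantage (h2h : List (List (String × Option String))) (team_name : String) (out : Int) : Prop := out = calculate_h2h_advantage_alt h2h team_name
instance (h2h : List (List (String × Option String))) (team_name : String) (out : Int) : Decidable (Spec_calculate_h2h_advantage h2h team_name out) := by unfold Spec_calculate_h2h_advantage; infer_instance

-- ===== CLAIM (what is proved, stated in full; the proofs are below) =====
def Claim_equal_calculate_h2h_advantage : Prop := ∀ (h2h : List (List (String × Option String))) (team_name : String), Dom_calculate_h2h_advantage h2h team_name → Spec_calculate_h2h_advantage h2h team_name (calculate_h2h_advantage h2h team_name)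

-- ===== LEMMAS AND PROOFS =====

-- A's conditional +1 fold is countP (with an arbitrary start value).
theorem pv_foldl_countP {β : Type} (p : β → Bool) :
    ∀ (l : List β) (c : Int),
      l.foldl (fun acc m => if p m then acc + 1 else acc) c = c + (l.countP p : Int) := by
  intro l
  induction l with
  | nil => intro c; simp
  | cons b t ih =>
      intro c
      simp only [List.foldl_cons, List.countP_cons, ih]
      by_cases h : p b = true
      · simp only [h, if_pos trivial]; push_cast; ring
      · simp [h]

-- B's single signed fold is countP(win) minus countP(not-win-and-loss-shaped):
-- the elif order makes the -1 branch fire only when the +1 branch did not.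
theorem pv_foldl_signed {β : Type} (pw pl : β → Bool) :
    ∀ (l : List β) (c : Int),
      l.foldl (fun acc m => if pw m then acc + 1 else if pl m then acc - 1 else acc) c
        = c + (l.countP pw : Int) - (l.countP (fun m => !pw m && pl m) : Int) := by
  intro l
  induction l with
  | nil => intro c; simp
  | cons b t ih =>
      intro c
      simp only [List.foldl_cons, List.countP_cons, ih]
      by_cases hw : pw b = true
      · simp only [hw, Bool.not_true, Bool.false_and, if_pos trivial]
        push_cast; simp; ring
      · have hw' : pw b = false := by simpa using hw
        by_cases hl : pl b = true
        · simp only [hw', hl, Bool.not_false, Bool.true_and, if_pos trivial]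
          push_cast; simp; ring
        · simp [hw', hl]

-- ===== VERDICT (by name: the statement is the Claim_ definition above) =====
theorem calculate_h2h_advantage_spec : Claim_equal_calculate_h2h_advantage := by
  intro h2h team_name _
  unfold Spec_calculate_h2h_advantage calculate_h2h_advantage calculate_h2h_advantage_alt
  set pw : List (String × Option String) → Bool :=
    fun m => pvWinner m == some team_name with hpw
  set plA : List (String × Option String) → Bool :=
    fun m => !(pvWinner m == some team_name || pvWinner m == some "draw" || pvWinner m == none) with hplA
  set plB : List (String × Option String) → Bool :=
    fun m => !(pvWinner m == none) && !(pvWinner m == some "draw") with hplB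
  have hB := pv_foldl_signed pw plB h2h 0
  have hcong : h2h.countP (fun m => !pw m && plB m) = h2h.countP plA := by
    apply List.countP_congr
    intro m _
    simp only [hpw, hplA, hplB]
    cases hw : pvWinner m <;> simp
  rw [pv_foldl_countP pw h2h 0, pv_foldl_countP plA h2h 0, hB, hcong]
  ring
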